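-- pv_equiv track=rewrite | github.com/981377660LMT/algorithm-study | 13_回溯算法/itertools/enumerateMatrix/enumerateMatrix.py | enumerateMatrixBorder
-- ===== SOURCE A (Python) =====
-- from typing import Generator, List, Tuple
--
-- def enumerateMatrixBorder(
--     x0: int, x1: int, y0: int, y1: int
-- ) -> Generator[Tuple[int, int], None, None]:
--     """遍历矩阵的边界.
--     x0<=x<=x1, y0<=y<=y1.
--     """
--     if y0 == y1:
--         for i in range(x0, x1 + 1):
--             yield i, y0
--         return
--     for i in range(x0, x1 + 1):
--         j = y0
--         while j <= y1:
--             yield i, j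
--             if i == x0 or i == x1:
--                 j += 1
--             else:
--                 j += y1 - y0
-- ===== SOURCE B (Python) =====
-- def enumerateMatrixBorder(x0, x1, y0, y1):
--     """Border of x0<=x<=x1, y0<=y<=y1, as three passes: top row, interior
--     row endpoints, bottom row (same yield order as the original)."""
--     if x0 > x1 or y0 > y1:
--         return
--     if y0 == y1:
--         for i in range(x0, x1 + 1):
--             yield i, y0
--         return
--     for j in range(y0, y1 + 1):
--         yield x0, j
--     for i in range(x0 + 1, x1):
--         yield i, y0
--         yield i, y1
--     if x1 > x0:
--         for j in range(y0, y1 + 1):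
--             yield x1, j
-- ===== Notes on version B (the rewrite author's own statement) =====
-- stated objective: simpler
-- what changed: Replaces the unified row loop with its computed-step while and per-cell i==x0/i==x1 test by an empty-region guard plus three plain passes (full top row, interior-row endpoints, full bottom row) in the same yield order.
import Mathlib
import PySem

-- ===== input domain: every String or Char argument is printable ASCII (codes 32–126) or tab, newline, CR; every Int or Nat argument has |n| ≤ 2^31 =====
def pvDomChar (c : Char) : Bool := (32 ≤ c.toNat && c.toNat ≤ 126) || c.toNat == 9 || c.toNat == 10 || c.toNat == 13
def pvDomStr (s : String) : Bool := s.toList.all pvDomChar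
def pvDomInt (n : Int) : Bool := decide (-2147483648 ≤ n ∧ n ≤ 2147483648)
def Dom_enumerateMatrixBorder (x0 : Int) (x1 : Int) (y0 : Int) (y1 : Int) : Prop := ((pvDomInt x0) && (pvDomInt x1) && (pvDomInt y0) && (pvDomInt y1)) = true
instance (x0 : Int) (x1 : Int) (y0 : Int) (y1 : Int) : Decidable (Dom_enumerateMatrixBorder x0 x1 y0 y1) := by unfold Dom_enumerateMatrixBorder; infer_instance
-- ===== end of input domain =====

-- B replaces A's unified row loop (computed-step while + per-cell edge test) by an
-- empty-region guard and three plain passes in the same yield order: simpler.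

-- ===== PORT A =====
-- inner `while j <= y1` of A; fuel bounds the iteration count (the reachable case
-- steps by at least 1, so (y1+1-y0).toNat iterations suffice; Python's divergent
-- unreachable case is cut off by fuel only there)
def pvWhileA (x0 : Int) (x1 : Int) (y0 : Int) (y1 : Int) (i : Int) : Nat → Int → List (Int × Int)
  | 0, _ => []
  | fuel + 1, j =>
    if j ≤ y1 then
      (i, j) :: pvWhileA x0 x1 y0 y1 i fuel (if i = x0 ∨ i = x1 then j + 1 else j + (y1 - y0))
    else []

def enumerateMatrixBorder (x0 : Int) (x1 : Int) (y0 : Int) (y1 : Int) : List (Int × Int) :=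
  if y0 = y1 then
    (PySem.List.pyRange x0 (x1 + 1) 1).map (fun i => (i, y0))
  else
    (PySem.List.pyRange x0 (x1 + 1) 1).flatMap (fun i =>
      pvWhileA x0 x1 y0 y1 i (y1 + 1 - y0).toNat y0)

-- ===== PORT B =====
def enumerateMatrixBorder_alt (x0 : Int) (x1 : Int) (y0 : Int) (y1 : Int) : List (Int × Int) :=
  if x0 > x1 ∨ y0 > y1 then []
  else if y0 = y1 then
    (PySem.List.pyRange x0 (x1 + 1) 1).map (fun i => (i, y0))
  else
    ((PySem.List.pyRange y0 (y1 + 1) 1).map (fun j => (x0, j)))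
    ++ ((PySem.List.pyRange (x0 + 1) x1 1).flatMap (fun i => [(i, y0), (i, y1)]))
    ++ (if x1 > x0 then (PySem.List.pyRange y0 (y1 + 1) 1).map (fun j => (x1, j)) else [])

-- ===== PRECONDITION & SPEC =====
def Spec_enumerateMatrixBorder (x0 : Int) (x1 : Int) (y0 : Int) (y1 : Int) (out : List (Int × Int)) : Prop := out = enumerateMatrixBorder_alt x0 x1 y0 y1
instance (x0 : Int) (x1 : Int) (y0 : Int) (y1 : Int) (out : List (Int × Int)) : Decidable (Spec_enumerateMatrixBorder x0 x1 y0 y1 out) := by unfold Spec_enumerateMatrixBorder; infer_instance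

-- ===== CLAIM (what is proved, stated in full; the proofs are below) =====
def Claim_equal_enumerateMatrixBorder : Prop := ∀ (x0 : Int) (x1 : Int) (y0 : Int) (y1 : Int), Dom_enumerateMatrixBorder x0 x1 y0 y1 → Spec_enumerateMatrixBorder x0 x1 y0 y1 (enumerateMatrixBorder x0 x1 y0 y1)

-- ===== LEMMAS AND PROOFS =====

-- A's inner loop on an edge row (i = x0 or i = x1) yields the whole row
theorem pvWhileA_edge (x0 x1 y0 y1 i : Int) (hi : i = x0 ∨ i = x1) :
    ∀ (fuel : Nat) (j : Int), (y1 + 1 - j).toNat ≤ fuel →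
      pvWhileA x0 x1 y0 y1 i fuel j = (PySem.List.pyRange j (y1 + 1) 1).map (fun k => (i, k)) := by
  intro fuel
  induction fuel with
  | zero =>
    intro j hj
    have hle : y1 + 1 ≤ j := by omega
    simp [pvWhileA, PySem.List.pyRange_one_eq_nil hle]
  | succ n ih =>
    intro j hj
    by_cases h : j ≤ y1
    · have hlt : j < y1 + 1 := by omega
      rw [PySem.List.pyRange_one_cons hlt]
      simp only [pvWhileA, if_pos h, if_pos hi, List.map_cons]
      rw [ih (j + 1) (by omega)]
    · have hle : y1 + 1 ≤ j := by omega
      simp [pvWhileA, h, PySem.List.pyRange_one_eq_nil hle]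

-- A's inner loop on an interior row (y0 < y1) yields exactly the two endpoints
theorem pvWhileA_mid (x0 x1 y0 y1 i : Int) (hi : ¬ (i = x0 ∨ i = x1)) (hy : y0 < y1)
    (fuel : Nat) (hf : 2 ≤ fuel) :
    pvWhileA x0 x1 y0 y1 i fuel y0 = [(i, y0), (i, y1)] := by
  obtain ⟨m, rfl⟩ : ∃ m, fuel = m + 2 := ⟨fuel - 2, by omega⟩
  have h1 : y0 ≤ y1 := le_of_lt hy
  simp only [pvWhileA, if_pos h1, if_neg hi]
  have e1 : y0 + (y1 - y0) = y1 := by ring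
  rw [e1]
  simp only [if_pos (le_refl y1)]
  have h2 : ¬ (y1 + (y1 - y0) ≤ y1) := by omega
  cases m with
  | zero => simp [pvWhileA]
  | succ k => simp [pvWhileA, h2]

-- the flatMap over the interior range, when y0 < y1
theorem flatMap_mid (x0 x1 y0 y1 : Int) (hy : y0 < y1) :
    ∀ (a : Int), x0 < a →
      (PySem.List.pyRange a x1 1).flatMap (fun i => pvWhileA x0 x1 y0 y1 i (y1 + 1 - y0).toNat y0)
        = (PySem.List.pyRange a x1 1).flatMap (fun i => [(i, y0), (i, y1)]) := by
  intro a ha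
  by_cases hax : a < x1
  · have hlen : (x1 - a).toNat ≠ 0 := by omega
    -- induction on the length of the range
    generalize hn : (x1 - a).toNat = n at *
    clear hlen
    induction n generalizing a with
    | zero =>
      have : x1 ≤ a := by omega
      omega
    | succ k ihk =>
      rw [PySem.List.pyRange_one_cons hax]
      simp only [List.flatMap_cons]
      have hi : ¬ (a = x0 ∨ a = x1) := by omega
      rw [pvWhileA_mid x0 x1 y0 y1 a hi hy _ (by omega)]
      by_cases h2 : a + 1 < x1
      · rw [ihk (a + 1) (by omega) h2 (by omega)]
      · have : PySem.List.pyRange (a + 1) x1 1 = [] := PySem.List.pyRange_one_eq_nil (by omega)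
        rw [this]; rfl
  · have : PySem.List.pyRange a x1 1 = [] := PySem.List.pyRange_one_eq_nil (by omega)
    rw [this]; rfl

-- ===== VERDICT (by name: the statement is the Claim_ definition above) =====
theorem enumerateMatrixBorder_spec : Claim_equal_enumerateMatrixBorder := by
  intro x0 x1 y0 y1 _
  unfold Spec_enumerateMatrixBorder enumerateMatrixBorder enumerateMatrixBorder_alt
  by_cases hy0 : y0 = y1
  · have hne : ¬ (x0 > x1 ∨ y0 > y1) ∨ (x0 > x1 ∨ y0 > y1) := (em _).symm
    by_cases hx : x0 > x1
    · have : PySem.List.pyRange x0 (x1 + 1) 1 = [] := PySem.List.pyRange_one_eq_nil (by omega)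
      simp [hy0, hx, this]
    · simp [hy0, hx]
  · rw [if_neg hy0, if_neg hy0]
    by_cases hgt : y0 > y1
    · -- inner while never runs: fuel (y1+1-y0).toNat = 0
      have hfz : (y1 + 1 - y0).toNat = 0 := by omega
      simp [hgt, hfz, pvWhileA]
    · have hy : y0 < y1 := by omega
      by_cases hx : x0 > x1
      · have : PySem.List.pyRange x0 (x1 + 1) 1 = [] := PySem.List.pyRange_one_eq_nil (by omega)
        simp [hx, this]
    -- x0 ≤ x1, y0 < y1
      rw [if_neg (show ¬ (x0 > x1 ∨ y0 > y1) by omega)]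
      have hfuel : (y1 + 1 - y0).toNat ≥ 2 := by omega
      by_cases hxx : x0 = x1
      · -- single row
        subst hxx
        rw [show x0 + 1 = x0 + 1 from rfl, PySem.List.pyRange_one_cons (show x0 < x0 + 1 by omega),
            PySem.List.pyRange_one_eq_nil (show x0 + 1 ≤ x0 + 1 by omega)]
        simp only [List.flatMap_cons, List.flatMap_nil, List.append_nil]
        rw [pvWhileA_edge x0 x0 y0 y1 x0 (Or.inl rfl) ((y1 + 1 - y0).toNat) y0 (le_refl _)]
        have hmid : PySem.List.pyRange (x0 + 1) x0 1 = [] := PySem.List.pyRange_one_eq_nil (by omega)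
        simp [hmid]
      · -- x0 < x1
        have hx01 : x0 < x1 := by omega
        -- split range x0..x1 as x0 :: (x0+1 .. x1-1+1=x1) ++ [x1]
        rw [PySem.List.pyRange_one_cons (show x0 < x1 + 1 by omega),
            PySem.List.pyRange_one_succ_right (show x0 + 1 ≤ x1 by omega)]
        simp only [List.flatMap_cons, List.flatMap_append, List.flatMap_cons, List.flatMap_nil,
          List.append_nil]
        rw [pvWhileA_edge x0 x1 y0 y1 x0 (Or.inl rfl) ((y1 + 1 - y0).toNat) y0 (le_refl _),
            pvWhileA_edge x0 x1 y0 y1 x1 (Or.inr rfl) ((y1 + 1 - y0).toNat) y0 (le_refl _),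
            flatMap_mid x0 x1 y0 y1 hy (x0 + 1) (by omega)]
        simp [hx01, List.append_assoc]
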